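-- pv_equiv track=rewrite | github.com/wangpatrick57/vldb2023blant | node_pair_extraction_helpers.py | create_node_pair_voting
-- ===== SOURCE A (Python) =====
-- from collections import defaultdict
--
-- def aug(node, n):
--     return f'{n}_{node}'
--
-- def create_node_pair_voting(m2m_pairs):
--     def add_to_voting(node1, node2):
--         if node1 not in node_pair_voting:
--             node_pair_voting[node1] = defaultdict(int)
--
--         if node2 not in node_pair_voting:
--             node_pair_voting[node2] = defaultdict(int)
--
--         node_pair_voting[node1][node2] += 1
--         node_pair_voting[node2][node1] += 1
--
--     node_pair_voting = dict()
--
--     for s1_node, s2_node in m2m_pairs: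
--         add_to_voting(aug(s1_node, 1), aug(s2_node, 2))
--
--     return node_pair_voting
-- ===== SOURCE B (Python) =====
-- from collections import defaultdict
--
-- def create_node_pair_voting(m2m_pairs):
--     # phase 1: one pass gathering, for every augmented node, its partners in encounter order
--     partners = {}
--     for s1_node, s2_node in m2m_pairs:
--         a, b = f'1_{s1_node}', f'2_{s2_node}'
--         partners[a] = partners.get(a, []) + [b]
--         partners[b] = partners.get(b, []) + [a]
--     # phase 2: tally each partner list into a defaultdict(int)
--     node_pair_voting = {}
--     for node, plist in partners.items():
--         inner = defaultdict(int)
--         for p in plist: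
--             inner[p] += 1
--         node_pair_voting[node] = inner
--     return node_pair_voting
-- ===== Notes on version B (the rewrite author's own statement) =====
-- stated objective: alternative
-- what changed: Replaces A's single pass of incremental symmetric increments into nested dicts by a two-phase gather-then-tally decomposition: one pass builds each augmented node's partner list in encounter order, then each list is tallied into its defaultdict(int) row.
import Mathlib
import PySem

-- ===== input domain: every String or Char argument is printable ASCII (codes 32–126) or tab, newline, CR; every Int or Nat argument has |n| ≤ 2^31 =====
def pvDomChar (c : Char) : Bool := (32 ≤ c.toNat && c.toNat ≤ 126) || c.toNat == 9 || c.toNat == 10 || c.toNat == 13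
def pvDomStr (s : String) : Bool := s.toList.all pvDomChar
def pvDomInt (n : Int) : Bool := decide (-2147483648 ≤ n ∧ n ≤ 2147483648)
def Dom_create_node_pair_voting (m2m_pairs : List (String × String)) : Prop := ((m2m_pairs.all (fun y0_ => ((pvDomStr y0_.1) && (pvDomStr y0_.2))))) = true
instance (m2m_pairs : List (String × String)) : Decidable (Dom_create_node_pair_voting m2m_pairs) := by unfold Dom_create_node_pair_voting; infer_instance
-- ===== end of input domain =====

-- B replaces A's single pass of incremental nested-dict increments by a gather-then-tally
-- decomposition (same cost): first collect each augmented node's partner list, then count each list.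

-- ===== PORT A =====
-- aug(node, n) = f'{n}_{node}'  (exact: str(int) ++ '_' ++ node, built on List Char)
def pvAug (node : String) (n : Int) : String :=
  String.ofList (PySem.Int.toChars n ++ '_' :: node.toList)

-- add_to_voting(node1, node2) (node_pair_voting passed explicitly; defaultdict(int) lookup = getD _ 0)
def pvAddToVoting (npv : PySem.Dict String (PySem.Dict String Int)) (node1 node2 : String) :
    PySem.Dict String (PySem.Dict String Int) :=
  let npv := if npv.contains node1 then npv else npv.insert node1 PySem.Dict.empty
  let npv := if npv.contains node2 then npv else npv.insert node2 PySem.Dict.empty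
  let npv := npv.modify node1 PySem.Dict.empty (fun m => m.modify node2 0 (· + 1))
  npv.modify node2 PySem.Dict.empty (fun m => m.modify node1 0 (· + 1))

def create_node_pair_voting (m2m_pairs : List (String × String)) : List (String × List (String × Int)) :=
  (m2m_pairs.foldl (fun npv p => pvAddToVoting npv (pvAug p.1 1) (pvAug p.2 2))
      PySem.Dict.empty).items.map (fun kv => (kv.1, kv.2.items))

-- ===== PORT B =====
def create_node_pair_voting_alt (m2m_pairs : List (String × String)) : List (String × List (String × Int)) :=
  -- phase 1: partners[a] = partners.get(a, []) + [b]; partners[b] = partners.get(b, []) + [a]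
  let partners : PySem.Dict String (List String) :=
    m2m_pairs.foldl (fun d p =>
      let a := String.ofList ('1' :: '_' :: p.1.toList)   -- f'1_{s1_node}'
      let b := String.ofList ('2' :: '_' :: p.2.toList)   -- f'2_{s2_node}'
      let d := d.insert a (d.getD a [] ++ [b])
      d.insert b (d.getD b [] ++ [a])) PySem.Dict.empty
  -- phase 2: for node, plist in partners.items(): tally plist into a defaultdict(int)
  let voting : PySem.Dict String (PySem.Dict String Int) :=
    partners.items.foldl (fun v kv =>
      v.insert kv.1 (kv.2.foldl (fun m p => m.modify p 0 (· + 1)) PySem.Dict.empty))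
      PySem.Dict.empty
  voting.items.map (fun kv => (kv.1, kv.2.items))

-- ===== PRECONDITION & SPEC =====
def Spec_create_node_pair_voting (m2m_pairs : List (String × String)) (out : List (String × List (String × Int))) : Prop := out = create_node_pair_voting_alt m2m_pairs
instance (m2m_pairs : List (String × String)) (out : List (String × List (String × Int))) : Decidable (Spec_create_node_pair_voting m2m_pairs out) := by unfold Spec_create_node_pair_voting; infer_instance

-- ===== CLAIM (what is proved, stated in full; the proofs are below) =====
def Claim_equal_create_node_pair_voting : Prop := ∀ (m2m_pairs : List (String × String)), Dom_create_node_pair_voting m2m_pairs → Spec_create_node_pair_voting m2m_pairs (create_node_pair_voting m2m_pairs)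

-- ===== LEMMAS AND PROOFS =====

-- abbreviations for the two augmented keys of a pair
def pvA1 (s : String) : String := pvAug s 1
def pvA2 (s : String) : String := pvAug s 2

theorem pvA1_ne_pvA2 (s t : String) : pvA1 s ≠ pvA2 t := by
  have e1 : PySem.Int.toChars 1 = ['1'] := by rfl
  have e2 : PySem.Int.toChars 2 = ['2'] := by rfl
  simp [pvA1, pvA2, pvAug, String.ext_iff, e1, e2]

theorem pvA1_def (s : String) : String.ofList ('1' :: '_' :: s.toList) = pvA1 s := rfl
theorem pvA2_def (s : String) : String.ofList ('2' :: '_' :: s.toList) = pvA2 s := rfl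

-- the list of partners of node k, in encounter order
def pvPl (xs : List (String × String)) (k : String) : List String :=
  xs.flatMap (fun p => (if k = pvA1 p.1 then [pvA2 p.2] else []) ++ (if k = pvA2 p.2 then [pvA1 p.1] else []))

-- the node-key accumulator both folds follow
def pvNK (xs : List (String × String)) (s : List String) : List String :=
  xs.foldl (fun s p => PySem.Set.add (PySem.Set.add s (pvA1 p.1)) (pvA2 p.2)) s

theorem pvPl_cons (x : String × String) (xs : List (String × String)) (k : String) :
    pvPl (x :: xs) k =
      ((if k = pvA1 x.1 then [pvA2 x.2] else []) ++ (if k = pvA2 x.2 then [pvA1 x.1] else [])) ++ pvPl xs k := by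
  simp [pvPl]

-- conditional insert of the default value never changes getD at that default
theorem pv_getD_cond {ν : Type} (d : PySem.Dict String ν) (a k : String) (v0 : ν) :
    ((if d.contains a then d else d.insert a v0).getD k v0) = d.getD k v0 := by
  by_cases h : d.contains a = true
  · simp [h]
  · simp only [Bool.not_eq_true] at h
    rw [if_neg (by simp [h]), PySem.Dict.getD_insert]
    by_cases hk : k = a
    · subst hk; rw [if_pos rfl, PySem.Dict.getD_of_not_contains d v0 h]
    · rw [if_neg hk]

theorem pv_keys_insert {ν : Type} (d : PySem.Dict String ν) (x : String) (v : ν) :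
    (d.insert x v).keys = PySem.Set.add d.keys x := by
  by_cases h : d.contains x = true
  · rw [PySem.Dict.keys_insert_of_contains _ _ h,
      PySem.Set.add_of_mem ((PySem.Dict.contains_iff_mem_keys d x).mp h)]
  · simp only [Bool.not_eq_true] at h
    rw [PySem.Dict.keys_insert_of_not_contains _ _ h,
      PySem.Set.add_of_not_mem (fun hm =>
        absurd ((PySem.Dict.contains_iff_mem_keys d x).mpr hm) (by simp [h]))]

theorem pv_keys_cond {ν : Type} (d : PySem.Dict String ν) (a : String) (v0 : ν) :
    (if d.contains a then d else d.insert a v0).keys = PySem.Set.add d.keys a := by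
  by_cases h : d.contains a = true
  · rw [if_pos h, PySem.Set.add_of_mem ((PySem.Dict.contains_iff_mem_keys d a).mp h)]
  · simp only [Bool.not_eq_true] at h
    rw [if_neg (by simp [h]), pv_keys_insert]

theorem pv_contains_cond {ν : Type} (d : PySem.Dict String ν) (a : String) (v0 : ν) :
    (if d.contains a then d else d.insert a v0).contains a = true := by
  by_cases h : d.contains a = true
  · simp [h]
  · simp only [Bool.not_eq_true] at h
    rw [if_neg (by simp [h])]
    exact PySem.Dict.contains_insert_self d a v0

-- A's step: effect on getD
theorem pv_stepA_getD (d : PySem.Dict String (PySem.Dict String Int)) (a b k : String) (hab : a ≠ b) :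
    (pvAddToVoting d a b).getD k PySem.Dict.empty =
      if k = a then (d.getD a PySem.Dict.empty).modify b 0 (· + 1)
      else if k = b then (d.getD b PySem.Dict.empty).modify a 0 (· + 1)
      else d.getD k PySem.Dict.empty := by
  simp only [pvAddToVoting, PySem.Dict.getD_modify, pv_getD_cond]
  have hba : ¬ (b = a) := fun h => hab h.symm
  split_ifs with h1 h2 h3 <;> first | rfl | (exfalso; exact hab (h2 ▸ h1 : a = b))

-- A's step: effect on keys
theorem pv_stepA_keys (d : PySem.Dict String (PySem.Dict String Int)) (a b : String) :
    (pvAddToVoting d a b).keys = PySem.Set.add (PySem.Set.add d.keys a) b := by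
  simp only [pvAddToVoting]
  set d1 := if d.contains a then d else d.insert a PySem.Dict.empty with hd1
  set d2 := if d1.contains b then d1 else d1.insert b PySem.Dict.empty with hd2
  have hca : d2.contains a = true := by
    have h1 : d1.contains a = true := pv_contains_cond d a _
    by_cases h : d1.contains b = true
    · rw [hd2, if_pos h]; exact h1
    · simp only [Bool.not_eq_true] at h
      rw [hd2, if_neg (by simp [h]), PySem.Dict.contains_insert, h1]
      simp
  have hcb : d2.contains b = true := pv_contains_cond d1 b _
  have hca3 : (d2.modify a PySem.Dict.empty (fun m => m.modify b 0 (· + 1))).contains b = true := by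
    rw [PySem.Dict.contains_modify]; simp [hcb]
  rw [PySem.Dict.keys_modify, PySem.Dict.keys_insert_of_contains _ _ hca3,
      PySem.Dict.keys_modify, PySem.Dict.keys_insert_of_contains _ _ hca,
      hd2, pv_keys_cond, hd1, pv_keys_cond]

-- B's step: effect on getD
theorem pv_stepB_getD (d : PySem.Dict String (List String)) (a b k : String) (hab : a ≠ b) :
    ((d.insert a (d.getD a [] ++ [b])).insert b
        ((d.insert a (d.getD a [] ++ [b])).getD b [] ++ [a])).getD k [] =
      if k = a then d.getD a [] ++ [b]
      else if k = b then d.getD b [] ++ [a]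
      else d.getD k [] := by
  have hba : ¬ (b = a) := fun h => hab h.symm
  simp only [PySem.Dict.getD_insert, hba, if_false]
  split_ifs with h1 h2 <;> first | rfl | (exfalso; exact hab (h2 ▸ h1))

-- B's step: effect on keys
theorem pv_stepB_keys (d : PySem.Dict String (List String)) (a b : String) :
    ((d.insert a (d.getD a [] ++ [b])).insert b
        ((d.insert a (d.getD a [] ++ [b])).getD b [] ++ [a])).keys =
      PySem.Set.add (PySem.Set.add d.keys a) b := by
  rw [pv_keys_insert, pv_keys_insert]

-- A's fold: getD characterisation
theorem pv_foldA_getD (xs : List (String × String)) (d : PySem.Dict String (PySem.Dict String Int)) (k : String) :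
    (xs.foldl (fun npv p => pvAddToVoting npv (pvA1 p.1) (pvA2 p.2)) d).getD k PySem.Dict.empty =
      (pvPl xs k).foldl (fun m v => m.modify v 0 (· + 1)) (d.getD k PySem.Dict.empty) := by
  induction xs generalizing d with
  | nil => simp [pvPl]
  | cons x xs ih =>
    rw [List.foldl_cons, ih, pvPl_cons, List.foldl_append, List.foldl_append]
    congr 1
    rw [pv_stepA_getD d _ _ k (pvA1_ne_pvA2 x.1 x.2)]
    by_cases hka : k = pvA1 x.1
    · have hkb : ¬ (k = pvA2 x.2) := fun h => pvA1_ne_pvA2 x.1 x.2 (hka ▸ h)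
      subst hka
      rw [if_pos rfl, if_pos rfl, if_neg hkb]
      simp
    · rw [if_neg hka, if_neg hka]
      by_cases hkb : k = pvA2 x.2
      · subst hkb; rw [if_pos rfl, if_pos rfl]; simp
      · rw [if_neg hkb, if_neg hkb]; simp

-- A's fold: keys characterisation
theorem pv_foldA_keys (xs : List (String × String)) (d : PySem.Dict String (PySem.Dict String Int)) :
    (xs.foldl (fun npv p => pvAddToVoting npv (pvA1 p.1) (pvA2 p.2)) d).keys = pvNK xs d.keys := by
  induction xs generalizing d with
  | nil => simp [pvNK]
  | cons x xs ih =>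
    rw [List.foldl_cons, ih, pv_stepA_keys d (pvA1 x.1) (pvA2 x.2)]
    rfl

-- B's phase-1 fold: getD characterisation
theorem pv_foldB_getD (xs : List (String × String)) (d : PySem.Dict String (List String)) (k : String) :
    (xs.foldl (fun d p =>
        let a := String.ofList ('1' :: '_' :: p.1.toList)
        let b := String.ofList ('2' :: '_' :: p.2.toList)
        let d := d.insert a (d.getD a [] ++ [b])
        d.insert b (d.getD b [] ++ [a])) d).getD k [] =
      d.getD k [] ++ pvPl xs k := by
  induction xs generalizing d with
  | nil => simp [pvPl]
  | cons x xs ih =>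
    rw [List.foldl_cons, ih, pvPl_cons]
    simp only [pvA1_def, pvA2_def]
    rw [pv_stepB_getD d (pvA1 x.1) (pvA2 x.2) k (pvA1_ne_pvA2 x.1 x.2)]
    by_cases hka : k = pvA1 x.1
    · have hkb : ¬ (k = pvA2 x.2) := fun h => pvA1_ne_pvA2 x.1 x.2 (hka ▸ h)
      subst hka
      rw [if_pos rfl, if_pos rfl, if_neg hkb]
      simp
    · rw [if_neg hka, if_neg hka]
      by_cases hkb : k = pvA2 x.2
      · subst hkb; rw [if_pos rfl, if_pos rfl]; simp
      · rw [if_neg hkb, if_neg hkb]; simp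

-- B's phase-1 fold: keys characterisation
theorem pv_foldB_keys (xs : List (String × String)) (d : PySem.Dict String (List String)) :
    (xs.foldl (fun d p =>
        let a := String.ofList ('1' :: '_' :: p.1.toList)
        let b := String.ofList ('2' :: '_' :: p.2.toList)
        let d := d.insert a (d.getD a [] ++ [b])
        d.insert b (d.getD b [] ++ [a])) d).keys = pvNK xs d.keys := by
  induction xs generalizing d with
  | nil => simp [pvNK]
  | cons x xs ih =>
    rw [List.foldl_cons, ih]
    simp only [pvA1_def, pvA2_def]
    rw [pv_stepB_keys d (pvA1 x.1) (pvA2 x.2)]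
    rfl

theorem pv_nk_nodup (xs : List (String × String)) (s : List String) (h : s.Nodup) : (pvNK xs s).Nodup := by
  induction xs generalizing s with
  | nil => exact h
  | cons x xs ih => exact ih _ (PySem.Set.nodup_add _ _ (PySem.Set.nodup_add _ _ h))

theorem pvAug_one (s : String) : pvAug s 1 = pvA1 s := rfl
theorem pvAug_two (s : String) : pvAug s 2 = pvA2 s := rfl

theorem pv_main (xs : List (String × String)) :
    (xs.foldl (fun npv p => pvAddToVoting npv (pvA1 p.1) (pvA2 p.2))
        PySem.Dict.empty).items.map (fun kv => (kv.1, kv.2.items)) =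
      ((xs.foldl (fun d p =>
          let a := String.ofList ('1' :: '_' :: p.1.toList)
          let b := String.ofList ('2' :: '_' :: p.2.toList)
          let d := d.insert a (d.getD a [] ++ [b])
          d.insert b (d.getD b [] ++ [a])) PySem.Dict.empty).items.foldl
        (fun v kv => v.insert kv.1 (kv.2.foldl (fun m p => m.modify p 0 (· + 1)) PySem.Dict.empty))
        PySem.Dict.empty).items.map (fun kv => (kv.1, kv.2.items)) := by
  set D := xs.foldl (fun npv p => pvAddToVoting npv (pvA1 p.1) (pvA2 p.2)) PySem.Dict.empty with hD
  set P := xs.foldl (fun d p =>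
          let a := String.ofList ('1' :: '_' :: p.1.toList)
          let b := String.ofList ('2' :: '_' :: p.2.toList)
          let d := d.insert a (d.getD a [] ++ [b])
          d.insert b (d.getD b [] ++ [a])) PySem.Dict.empty with hP
  have hDk : D.keys = pvNK xs [] := by
    rw [hD, pv_foldA_keys, PySem.Dict.keys_empty]
  have hPk : P.keys = pvNK xs [] := by
    rw [hP, pv_foldB_keys, PySem.Dict.keys_empty]
  have hndD : D.keys.Nodup := hDk ▸ pv_nk_nodup xs [] List.nodup_nil
  have hndP : P.keys.Nodup := hPk ▸ pv_nk_nodup xs [] List.nodup_nil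
  have hDg : ∀ k, D.getD k PySem.Dict.empty = PySem.Dict.counter (pvPl xs k) := by
    intro k
    rw [hD, pv_foldA_getD, PySem.Dict.getD_empty, PySem.Dict.counter_eq_foldl]
  have hPg : ∀ k, P.getD k [] = pvPl xs k := by
    intro k
    rw [hP, pv_foldB_getD, PySem.Dict.getD_empty, List.nil_append]
  have hV : (P.items.foldl
        (fun v kv => v.insert kv.1 (kv.2.foldl (fun m p => m.modify p 0 (· + 1)) PySem.Dict.empty))
        (PySem.Dict.empty : PySem.Dict String (PySem.Dict String Int))).items
      = P.items.map (fun kv => (kv.1, PySem.Dict.counter kv.2)) := by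
    simp only [← PySem.Dict.counter_eq_foldl]
    have h2 : (P.items.map (fun kv => kv.1)).Nodup := hndP
    rw [PySem.Dict.items_foldl_insert_fresh P.items (fun kv => kv.1)
        (fun kv => PySem.Dict.counter kv.2) PySem.Dict.empty
        (fun a _ => PySem.Dict.contains_empty a.1) h2]
    rfl
  rw [hV, PySem.Dict.items_eq_map_keys D hndD PySem.Dict.empty,
      PySem.Dict.items_eq_map_keys P hndP []]
  simp only [List.map_map]
  simp only [hDg, hPg, hDk, hPk]
  rfl

-- ===== VERDICT (by name: the statement is the Claim_ definition above) =====
theorem create_node_pair_voting_spec : Claim_equal_create_node_pair_voting := by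
  intro xs _
  unfold Spec_create_node_pair_voting create_node_pair_voting create_node_pair_voting_alt
  simp only [pvAug_one, pvAug_two]
  exact pv_main xs
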